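-- pv_equiv track=rewrite | github.com/cyber-zeff/networking-projects | comp-networks-sem4/assignment-2/tld_server.py | get_sld
-- ===== SOURCE A (Python) =====
-- TLD_ZONE = {
--     "google.com" : ("ns1.google.com", "127.0.0.1", 5302),
--     "youtube.com" : ("ns1.youtube.com", "127.0.0.1", 5302),
--     "facebook.com" : ("ns1.facebook.com", "127.0.0.1", 5302),
--     "amazon.com" : ("ns1.amazon.com", "127.0.0.1", 5302),
--     "microsoft.com" : ("ns1.microsoft.com", "127.0.0.1", 5302),
--     "github.com" : ("ns1.github.com", "127.0.0.1", 5302),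
--     "stackoverflow.com" : ("ns1.stackoverflow.com", "127.0.0.1", 5302),
--
--     "umass.edu" : ("ns1.umass.edu", "127.0.0.1", 5302),
--     "mit.edu" : ("ns1.mit.edu", "127.0.0.1", 5302),
--     "stanford.edu" : ("ns1.stanford.edu", "127.0.0.1", 5302),
--     "nu.edu.pk" : ("ns1.nu.edu.pk", "127.0.0.1", 5302),
--
--     "wikipedia.org" : ("ns1.wikipedia.org", "127.0.0.1", 5302),
--
--     "github.io"     : ("ns1.github.io",         "127.0.0.1", 5302),
--
--     "fast.edu.pk"   : ("ns1.fast.edu.pk",       "127.0.0.1", 5302),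
-- }
--
-- def get_sld(domain: str) -> str:
--     domain = domain.strip(".")
--     parts = domain.split(".")
--
--     for i in range(len(parts) - 1):
--         candidate = ".".join(parts[i:])
--         if candidate in TLD_ZONE:
--             return candidate
--     return domain
-- ===== SOURCE B (Python) =====
-- TLD_ZONE = {
--     "google.com" : ("ns1.google.com", "127.0.0.1", 5302),
--     "youtube.com" : ("ns1.youtube.com", "127.0.0.1", 5302),
--     "facebook.com" : ("ns1.facebook.com", "127.0.0.1", 5302),
--     "amazon.com" : ("ns1.amazon.com", "127.0.0.1", 5302),
--     "microsoft.com" : ("ns1.microsoft.com", "127.0.0.1", 5302),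
--     "github.com" : ("ns1.github.com", "127.0.0.1", 5302),
--     "stackoverflow.com" : ("ns1.stackoverflow.com", "127.0.0.1", 5302),
--
--     "umass.edu" : ("ns1.umass.edu", "127.0.0.1", 5302),
--     "mit.edu" : ("ns1.mit.edu", "127.0.0.1", 5302),
--     "stanford.edu" : ("ns1.stanford.edu", "127.0.0.1", 5302),
--     "nu.edu.pk" : ("ns1.nu.edu.pk", "127.0.0.1", 5302),
--
--     "wikipedia.org" : ("ns1.wikipedia.org", "127.0.0.1", 5302),
--
--     "github.io"     : ("ns1.github.io",         "127.0.0.1", 5302),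
--
--     "fast.edu.pk"   : ("ns1.fast.edu.pk",       "127.0.0.1", 5302),
-- }
--
-- def get_sld(domain: str) -> str:
--     # One right-to-left accumulating pass: the suffix string is extended by one
--     # label per step instead of being re-joined from scratch for every start index.
--     domain = domain.strip(".")
--     parts = domain.split(".")
--     suffix = parts[-1]
--     best = domain
--     for p in reversed(parts[:-1]):
--         suffix = p + "." + suffix
--         if suffix in TLD_ZONE:
--             best = suffix
--     return best
-- ===== Notes on version B (the rewrite author's own statement) =====
-- stated objective: alternative
-- what changed: Replaces the ascending scan that re-joins a fresh candidate suffix from scratch for every start index (early-returning on the first, i.e. longest, match) with a single right-to-left pass that extends one accumulated suffix by one label per step and overwrites the best match, so the longest match wins; per-candidate work drops from a full re-join to one concatenation, though in measurement this is not a wall-clock win.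
import Mathlib
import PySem

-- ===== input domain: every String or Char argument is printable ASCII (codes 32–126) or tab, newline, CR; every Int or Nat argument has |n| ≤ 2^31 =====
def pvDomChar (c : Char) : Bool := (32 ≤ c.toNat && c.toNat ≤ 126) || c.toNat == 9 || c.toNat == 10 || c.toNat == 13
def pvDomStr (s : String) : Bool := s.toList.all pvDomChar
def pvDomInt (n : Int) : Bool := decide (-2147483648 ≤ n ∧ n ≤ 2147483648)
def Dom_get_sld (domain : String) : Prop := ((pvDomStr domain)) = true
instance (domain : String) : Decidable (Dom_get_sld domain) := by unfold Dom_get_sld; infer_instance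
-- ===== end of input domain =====

-- B replaces A's ascending loop that re-joins each candidate suffix from scratch by one right-to-left pass that accumulates the suffix and overwrites the best match (alternative decomposition; not measured faster).

-- shared module-level constant TLD_ZONE (values kept, only key membership is used)
def TLD_ZONE : PySem.Dict String (String × String × Int) := PySem.Dict.ofList
  [ ("google.com", ("ns1.google.com", "127.0.0.1", 5302)),
    ("youtube.com", ("ns1.youtube.com", "127.0.0.1", 5302)),
    ("facebook.com", ("ns1.facebook.com", "127.0.0.1", 5302)),
    ("amazon.com", ("ns1.amazon.com", "127.0.0.1", 5302)),
    ("microsoft.com", ("ns1.microsoft.com", "127.0.0.1", 5302)),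
    ("github.com", ("ns1.github.com", "127.0.0.1", 5302)),
    ("stackoverflow.com", ("ns1.stackoverflow.com", "127.0.0.1", 5302)),
    ("umass.edu", ("ns1.umass.edu", "127.0.0.1", 5302)),
    ("mit.edu", ("ns1.mit.edu", "127.0.0.1", 5302)),
    ("stanford.edu", ("ns1.stanford.edu", "127.0.0.1", 5302)),
    ("nu.edu.pk", ("ns1.nu.edu.pk", "127.0.0.1", 5302)),
    ("wikipedia.org", ("ns1.wikipedia.org", "127.0.0.1", 5302)),
    ("github.io", ("ns1.github.io", "127.0.0.1", 5302)),
    ("fast.edu.pk", ("ns1.fast.edu.pk", "127.0.0.1", 5302)) ]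

-- ===== PORT A =====
-- A's for-loop with early return, as recursion over the index list range(len(parts)-1)
def getSldLoopA (parts : List String) (dflt : String) : List Int → String
  | [] => dflt
  | i :: rest =>
      let candidate := PySem.Str.join "." (PySem.List.slice parts (some i) none)
      if TLD_ZONE.contains candidate then candidate else getSldLoopA parts dflt rest

def get_sld (domain : String) : String :=
  let d := PySem.Str.stripChars domain "."
  let parts := (PySem.Str.split? d ".").getD []          -- sep ≠ "" : split? is always some
  getSldLoopA parts d (PySem.List.pyRange 0 ((parts.length : Int) - 1) 1)

-- ===== PORT B =====
-- B's loop body: extend the running suffix by one label, overwrite best on a hit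
def getSldStepB (sb : String × String) (p : String) : String × String :=
  let s := PySem.Str.join "." [p, sb.1]
  (s, if TLD_ZONE.contains s then s else sb.2)

def get_sld_alt (domain : String) : String :=
  let d := PySem.Str.stripChars domain "."
  let parts := (PySem.Str.split? d ".").getD []
  let suffix := (PySem.List.pyGet? parts (-1)).getD ""   -- parts is never empty in Python
  (List.foldl getSldStepB (suffix, d) (PySem.List.slice parts none (some (-1))).reverse).2

-- ===== PRECONDITION & SPEC =====
def Spec_get_sld (domain : String) (out : String) : Prop := out = get_sld_alt domain
instance (domain : String) (out : String) : Decidable (Spec_get_sld domain out) := by unfold Spec_get_sld; infer_instance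

-- ===== CLAIM (what is proved, stated in full; the proofs are below) =====
def Claim_equal_get_sld : Prop := ∀ (domain : String), Dom_get_sld domain → Spec_get_sld domain (get_sld domain)

-- ===== LEMMAS AND PROOFS =====

-- structural first-match over the tail lists of parts (candidates exclude the lone last label)
def fmStruct (dflt : String) : List String → String
  | [] => dflt
  | [_] => dflt
  | p :: q :: rest =>
      let c := PySem.Str.join "." (p :: q :: rest)
      if TLD_ZONE.contains c then c else fmStruct dflt (q :: rest)

theorem join_cons_str (p : String) (rest : List String) (h : rest ≠ []) :
    PySem.Str.join "." [p, PySem.Str.join "." rest] = PySem.Str.join "." (p :: rest) := by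
  obtain ⟨q, rest', rfl⟩ := List.exists_cons_of_ne_nil h
  apply String.toList_injective
  simp only [PySem.Str.toList_join, List.map]
  rw [PySem.Chars.join_cons_cons]
  rw [PySem.Chars.join_cons_cons]
  simp [PySem.Chars.join_singleton]

theorem fmStruct_short (dflt : String) (xs : List String) (h : xs.length ≤ 1) :
    fmStruct dflt xs = dflt := by
  match xs with
  | [] => rfl
  | [_] => rfl
  | _ :: _ :: _ => simp at h

-- A's index loop computes the structural first-match over parts.drop k
theorem loopA_eq_fmStruct (parts : List String) (dflt : String) :
    ∀ (m k : Nat), parts.length - k ≤ m →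
      getSldLoopA parts dflt (PySem.List.pyRange (k : Int) ((parts.length : Int) - 1) 1)
        = fmStruct dflt (parts.drop k) := by
  intro m
  induction m with
  | zero =>
      intro k hk
      have hk' : parts.length ≤ k := by omega
      rw [PySem.List.pyRange_one_eq_nil (show ((parts.length : Int) - 1) ≤ (k : Int) by omega)]
      rw [fmStruct_short dflt _ (by simp; omega)]
      rfl
  | succ m ih =>
      intro k hk
      by_cases hlt : (k : Int) < (parts.length : Int) - 1
      · rw [PySem.List.pyRange_one_cons hlt]
        have hk2 : k + 2 ≤ parts.length := by omega
        have hdrop : 2 ≤ (parts.drop k).length := by simp; omega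
        have hne : parts.drop k ≠ [] := by intro h; rw [h] at hdrop; simp at hdrop
        obtain ⟨p, t, hpt⟩ := List.exists_cons_of_ne_nil hne
        have hne2 : t ≠ [] := by
          intro h; rw [hpt, h] at hdrop; simp at hdrop
        obtain ⟨q, rest, hqr⟩ := List.exists_cons_of_ne_nil hne2
        have hshape : parts.drop k = p :: q :: rest := by rw [hpt, hqr]
        have hslice : PySem.List.slice parts (some (k : Int)) none = parts.drop k :=
          PySem.List.slice_from_natCast parts k
        have hnext : ((k : Int) + 1) = ((k + 1 : Nat) : Int) := by push_cast; ring
        have hdropsucc : parts.drop (k + 1) = q :: rest := by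
          rw [← List.tail_drop, hpt, List.tail_cons, hqr]
        rw [show getSldLoopA parts dflt ((k : Int) :: PySem.List.pyRange ((k : Int) + 1) ((parts.length : Int) - 1) 1)
              = (let candidate := PySem.Str.join "." (PySem.List.slice parts (some (k : Int)) none);
                 if TLD_ZONE.contains candidate then candidate
                 else getSldLoopA parts dflt (PySem.List.pyRange ((k : Int) + 1) ((parts.length : Int) - 1) 1)) from rfl]
        rw [hnext, ih (k + 1) (by omega)]
        rw [hslice, hshape, hdropsucc]
        simp only [fmStruct]
      · rw [PySem.List.pyRange_one_eq_nil (show ((parts.length : Int) - 1) ≤ (k : Int) by omega)]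
        rw [fmStruct_short dflt _ (by simp; omega)]
        rfl

-- B's right-to-left fold: suffix accumulates the joined tail, best is the first match
-- among the suffixes that start inside qs (scanning qs left to right)
def fmB (b : String) : List String → List String → String
  | [], _ => b
  | q :: qs, rest =>
      let c := PySem.Str.join "." (q :: (qs ++ rest))
      if TLD_ZONE.contains c then c else fmB b qs rest

theorem foldB_spec (qs rest : List String) (hrest : rest ≠ []) (b : String) :
    List.foldl getSldStepB (PySem.Str.join "." rest, b) qs.reverse
      = (PySem.Str.join "." (qs ++ rest), fmB b qs rest) := by
  induction qs with
  | nil => simp [fmB]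
  | cons q qs ih =>
      have hreve : (q :: qs).reverse = qs.reverse ++ [q] := by simp
      rw [hreve, List.foldl_append, ih]
      have hne : qs ++ rest ≠ [] := by
        intro h; exact hrest (List.eq_nil_of_append_eq_nil h).2
      have hs : PySem.Str.join "." [q, PySem.Str.join "." (qs ++ rest)]
          = PySem.Str.join "." (q :: (qs ++ rest)) := join_cons_str q (qs ++ rest) hne
      simp only [List.foldl_cons, List.foldl_nil, getSldStepB, hs, fmB, List.cons_append]

theorem fmStruct_eq_fmB (d last : String) (qs : List String) :
    fmStruct d (qs ++ [last]) = fmB d qs [last] := by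
  induction qs with
  | nil => rfl
  | cons q qs ih =>
      cases qs with
      | nil => simp [fmStruct, fmB]
      | cons q2 qs2 =>
          simp only [List.cons_append] at ih ⊢
          simp only [fmStruct, fmB, List.cons_append] at ih ⊢
          rw [ih]

-- ===== VERDICT (by name: the statement is the Claim_ definition above) =====
theorem get_sld_spec : Claim_equal_get_sld := by
  intro domain _
  unfold Spec_get_sld
  simp only [get_sld, get_sld_alt]
  set d := PySem.Str.stripChars domain "." with hd
  set parts := (PySem.Str.split? d ".").getD [] with hparts
  rw [show (0 : Int) = ((0 : Nat) : Int) from rfl,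
      loopA_eq_fmStruct parts d parts.length 0 (by omega), List.drop_zero]
  cases hp : parts.reverse with
  | nil =>
      have : parts = [] := by simpa using congrArg List.reverse hp
      simp [this, fmStruct, PySem.List.pyGet?, PySem.List.slice]
  | cons last qs' =>
      have hparts_eq : parts = qs'.reverse ++ [last] := by
        have := congrArg List.reverse hp
        simpa using this
      have hlastget : (PySem.List.pyGet? parts (-1)).getD "" = last := by
        rw [hparts_eq]
        simp [PySem.List.pyGet?, PySem.List.pyIdx?]
      have hslice : PySem.List.slice parts none (some (-1)) = qs'.reverse := by
        rw [PySem.List.slice_to_neg_one, hparts_eq]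
        simp
      rw [hlastget, hslice]
      have hjoin1 : (last : String) = PySem.Str.join "." [last] := by
        apply String.toList_injective
        simp [PySem.Str.toList_join, PySem.Chars.join_singleton]
      rw [hjoin1, foldB_spec qs'.reverse [last] (by simp) d]
      rw [hparts_eq, fmStruct_eq_fmB]
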